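-- pv_equiv track=rewrite | github.com/netkatana/netkatana | src/netkatana/validators/http/headers/csp.py | _parse_csp_directive_names
-- ===== SOURCE A (Python) =====
-- def _parse_csp_directive_names(value: str) -> list[str]:
--     names: list[str] = []
--
--     for part in value.split(";"):
--         part = part.strip()
--         if not part:
--             continue
--
--         names.append(part.split()[0].lower())
--
--     return names
-- ===== SOURCE B (Python) =====
-- def _parse_csp_directive_names(value: str) -> list[str]:
--     # Single left-to-right character scan (no split/re-split): collect the first
--     # whitespace-delimited token of each ';'-separated segment.
--     names: list[str] = []
--     token: list[str] = []
--     seen = False  # a token has already been completed in the current segment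
--     for ch in value:
--         if ch == ";":
--             if token:
--                 names.append("".join(token).lower())
--             token = []
--             seen = False
--         elif ch.isspace():
--             if token:
--                 names.append("".join(token).lower())
--                 token = []
--                 seen = True
--         elif not seen:
--             token.append(ch)
--     if token:
--         names.append("".join(token).lower())
--     return names
-- ===== Notes on version B (the rewrite author's own statement) =====
-- stated objective: alternative
-- what changed: A splits the value on semicolons and then strips and whitespace-splits each part; B makes a single left-to-right character scan with a (current token, token-already-seen) state machine and never builds the intermediate part lists.
import Mathlib
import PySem

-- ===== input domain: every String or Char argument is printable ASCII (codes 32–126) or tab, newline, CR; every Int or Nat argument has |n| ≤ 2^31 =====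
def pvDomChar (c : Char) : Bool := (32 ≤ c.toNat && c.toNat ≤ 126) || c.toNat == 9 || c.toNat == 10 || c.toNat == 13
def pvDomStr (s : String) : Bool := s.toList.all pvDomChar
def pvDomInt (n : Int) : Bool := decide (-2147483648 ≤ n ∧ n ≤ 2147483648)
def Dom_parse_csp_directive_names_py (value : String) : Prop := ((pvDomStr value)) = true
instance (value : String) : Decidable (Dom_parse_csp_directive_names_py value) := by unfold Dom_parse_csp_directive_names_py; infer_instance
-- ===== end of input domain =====

-- B replaces A's split-on-semicolon + per-part strip/re-split with a single character scan
-- keeping (current token, token-already-seen) state; same return value, alternative structure.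

-- ===== PORT A =====
-- the loop body: part = part.strip(); if not part: continue; names.append(part.split()[0].lower())
def pvStepA (names : List String) (part : List Char) : List String :=
  let p := PySem.Chars.strip part
  if p.isEmpty then names
  else
    -- part.split()[0]: index 0 of a provably nonempty list (p is nonempty), so .getD [] is never used
    names ++ [String.mk (PySem.Chars.lower ((PySem.List.pyGet? (PySem.Chars.split₀ p) 0).getD []))]

def parse_csp_directive_names_py (value : String) : List String :=
  (PySem.Chars.splitOn value.toList [';']).foldl pvStepA []

-- ===== PORT B =====
-- if token: names.append("".join(token).lower()) — the flush pattern of Source B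
def pvFlushB (names : List String) (tok : List Char) : List String :=
  if tok.isEmpty then names else names ++ [String.mk (PySem.Chars.lower tok)]

-- the for-loop of Source B over the characters, state = (names, token, seen)
def pvGoB : List Char → List String → List Char → Bool → List String
  | [], names, tok, _ => pvFlushB names tok
  | c :: rest, names, tok, seen =>
    if c = ';' then pvGoB rest (pvFlushB names tok) [] false
    else if PySem.Chars.isspace c then
      (if tok.isEmpty then pvGoB rest names tok seen
       else pvGoB rest (pvFlushB names tok) [] true)
    else if seen then pvGoB rest names tok seen
    else pvGoB rest names (tok ++ [c]) seen

def parse_csp_directive_names_py_alt (value : String) : List String :=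
  pvGoB value.toList [] [] false

-- ===== PRECONDITION & SPEC =====
def Spec_parse_csp_directive_names_py (value : String) (out : List String) : Prop := out = parse_csp_directive_names_py_alt value
instance (value : String) (out : List String) : Decidable (Spec_parse_csp_directive_names_py value out) := by unfold Spec_parse_csp_directive_names_py; infer_instance

-- ===== CLAIM (what is proved, stated in full; the proofs are below) =====
def Claim_equal_parse_csp_directive_names_py : Prop := ∀ (value : String), Dom_parse_csp_directive_names_py value → Spec_parse_csp_directive_names_py value (parse_csp_directive_names_py value)

-- ===== LEMMAS AND PROOFS =====

-- cons onto the head segment of a (never empty) segment list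
def pvConsH (pre : List Char) : List (List Char) → List (List Char)
  | [] => [pre]
  | p :: ps => (pre ++ p) :: ps

-- reference semantics of value.split(";"): segments between ';' characters
def pvSemiSplit : List Char → List (List Char)
  | [] => [[]]
  | c :: r => if c = ';' then [] :: pvSemiSplit r else pvConsH [c] (pvSemiSplit r)

lemma pvSemiSplit_ne_nil (l : List Char) : pvSemiSplit l ≠ [] := by
  cases l with
  | nil => simp [pvSemiSplit]
  | cons c r =>
    simp only [pvSemiSplit]
    split
    · simp
    · cases h : pvSemiSplit r <;> simp [pvConsH]

lemma pvConsH_nil (ls : List (List Char)) (h : ls ≠ []) : pvConsH [] ls = ls := by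
  cases ls with
  | nil => exact absurd rfl h
  | cons p ps => simp [pvConsH]

lemma pvGo_semi (fuel : Nat) : ∀ (l cur : List Char) (acc : List (List Char)),
    l.length ≤ fuel →
    PySem.Chars.splitOn.go [';'] fuel l cur acc = acc.reverse ++ pvConsH cur.reverse (pvSemiSplit l) := by
  induction fuel with
  | zero =>
    intro l cur acc h
    have : l = [] := by cases l <;> simp_all
    subst this
    simp [PySem.Chars.splitOn.go, pvSemiSplit, pvConsH]
  | succ fuel ih =>
    intro l cur acc h
    cases l with
    | nil => simp [PySem.Chars.splitOn.go, pvSemiSplit, pvConsH]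
    | cons c rest =>
      rw [PySem.Chars.splitOn.go]
      by_cases hc : c = ';'
      · subst hc
        have hpre : List.isPrefixOf [';'] (';' :: rest) = true := by
          simp [List.isPrefixOf]
        simp only [hpre, if_pos]
        have hdrop : List.drop [';'].length (';' :: rest) = rest := rfl
        rw [hdrop, ih rest [] ((cur.reverse) :: acc) (by simpa using Nat.le_of_succ_le_succ h)]
        have hne := pvSemiSplit_ne_nil rest
        simp only [pvSemiSplit, if_pos, List.reverse_cons, List.append_assoc,
          List.singleton_append, pvConsH]
        cases hr : pvSemiSplit rest with
        | nil => exact absurd hr hne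
        | cons p ps => simp [pvConsH]
      · have hpre : List.isPrefixOf [';'] (c :: rest) = false := by
          simp [List.isPrefixOf, hc]
          intro hcc; exact absurd hcc.symm hc
        simp only [hpre]
        rw [if_neg (by simp)]
        rw [ih rest (c :: cur) acc (by simpa using Nat.le_of_succ_le_succ h)]
        simp only [pvSemiSplit, if_neg hc]
        cases hr : pvSemiSplit rest with
        | nil => exact absurd hr (pvSemiSplit_ne_nil rest)
        | cons p ps => simp [pvConsH]

lemma pvSplitOn_semi (l : List Char) : PySem.Chars.splitOn l [';'] = pvSemiSplit l := by
  rw [PySem.Chars.splitOn, pvGo_semi (l.length + 1) l [] [] (by omega)]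
  simp [pvConsH_nil _ (pvSemiSplit_ne_nil l)]

-- characterisation of split₀.go
lemma pvSplit₀_go (r : List Char) : ∀ (cur : List Char) (acc : List (List Char)),
    PySem.Chars.split₀.go r cur acc = acc.reverse ++
      (if cur.isEmpty then PySem.Chars.split₀ r
       else (cur.reverse ++ r.takeWhile (fun d => !PySem.Chars.isspace d)) ::
            PySem.Chars.split₀ (r.dropWhile (fun d => !PySem.Chars.isspace d))) := by
  induction r with
  | nil =>
    intro cur acc
    cases cur <;> simp [PySem.Chars.split₀.go, PySem.Chars.split₀]
  | cons d r ih =>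
    intro cur acc
    rw [PySem.Chars.split₀.go]
    by_cases hd : PySem.Chars.isspace d = true
    · simp only [hd, if_pos]
      by_cases hcur : cur = []
      · subst hcur
        simp only [List.isEmpty_nil, if_pos]
        rw [ih [] acc]
        have : PySem.Chars.split₀ (d :: r) = PySem.Chars.split₀ r := by
          rw [PySem.Chars.split₀, PySem.Chars.split₀.go]
          simp only [hd, if_pos, List.isEmpty_nil]
          rw [ih [] []]
          simp [PySem.Chars.split₀]
        simp [this, List.takeWhile, List.dropWhile, hd]
      · have hc : cur.isEmpty = false := by simpa [List.isEmpty_iff] using hcur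
        simp only [hc, Bool.false_eq_true, if_neg, if_false]
        rw [ih [] (cur.reverse :: acc)]
        have hsp : PySem.Chars.split₀ (d :: r) = PySem.Chars.split₀ r := by
          rw [PySem.Chars.split₀, PySem.Chars.split₀.go]
          simp only [hd, if_pos, List.isEmpty_nil]
          rw [ih [] []]
          simp [PySem.Chars.split₀]
        simp [List.takeWhile, List.dropWhile, hd, hsp]
    · have hd' : PySem.Chars.isspace d = false := by simpa using hd
      simp only [hd', Bool.false_eq_true, if_neg, if_false]
      rw [ih (d :: cur) acc]
      have hne : (d :: cur).isEmpty = false := by simp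
      by_cases hcur : cur = []
      · subst hcur
        simp only [hne, List.isEmpty_nil, if_pos, Bool.false_eq_true, if_false]
        have : PySem.Chars.split₀ (d :: r) =
            (([d] : List Char) ++ r.takeWhile (fun d => !PySem.Chars.isspace d)) ::
            PySem.Chars.split₀ (r.dropWhile (fun d => !PySem.Chars.isspace d)) := by
          rw [PySem.Chars.split₀, PySem.Chars.split₀.go]
          simp only [hd', Bool.false_eq_true, if_false]
          rw [ih [d] []]
          simp
        simp [this]
      · have hc : cur.isEmpty = false := by simpa [List.isEmpty_iff] using hcur
        simp [hc, List.takeWhile, List.dropWhile, hd']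
  
lemma pvSplit₀_nil : PySem.Chars.split₀ [] = [] := by
  simp [PySem.Chars.split₀, PySem.Chars.split₀.go]

lemma pvSplit₀_cons_space (c : Char) (r : List Char) (h : PySem.Chars.isspace c = true) :
    PySem.Chars.split₀ (c :: r) = PySem.Chars.split₀ r := by
  rw [PySem.Chars.split₀, PySem.Chars.split₀.go]
  simp only [h, if_pos, List.isEmpty_nil]
  rw [pvSplit₀_go r [] []]
  simp [PySem.Chars.split₀]

lemma pvSplit₀_cons_nonspace (c : Char) (r : List Char) (h : PySem.Chars.isspace c = false) :
    PySem.Chars.split₀ (c :: r) =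
      (c :: r.takeWhile (fun d => !PySem.Chars.isspace d)) ::
      PySem.Chars.split₀ (r.dropWhile (fun d => !PySem.Chars.isspace d)) := by
  rw [PySem.Chars.split₀, PySem.Chars.split₀.go]
  simp only [h, Bool.false_eq_true, if_false]
  rw [pvSplit₀_go r [c] []]
  simp

-- rstrip on a cons
lemma pvRstrip_cons (d : Char) (r : List Char) :
    PySem.Chars.rstrip (d :: r) =
      if (PySem.Chars.rstrip r).isEmpty then (if PySem.Chars.isspace d then [] else [d])
      else d :: PySem.Chars.rstrip r := by
  simp only [PySem.Chars.rstrip, List.reverse_cons, List.dropWhile_append]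
  by_cases h : (List.dropWhile PySem.Chars.isspace r.reverse).isEmpty
  · simp only [h, if_pos, List.dropWhile]
    by_cases hd : PySem.Chars.isspace d = true <;> simp [hd, List.isEmpty_iff.mp h]
  · have h' : (List.dropWhile PySem.Chars.isspace r.reverse).isEmpty = false := by
      simpa using h
    simp [h', List.isEmpty_eq_false_iff.mp h']

lemma pvRstrip_eq_nil_iff (r : List Char) :
    PySem.Chars.rstrip r = [] ↔ ∀ c ∈ r, PySem.Chars.isspace c = true := by
  simp [PySem.Chars.rstrip, List.dropWhile_eq_nil_iff]

-- the first word does not change when trailing whitespace is stripped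
lemma pvTakeWhile_rstrip (r : List Char) :
    (PySem.Chars.rstrip r).takeWhile (fun d => !PySem.Chars.isspace d) =
      r.takeWhile (fun d => !PySem.Chars.isspace d) := by
  induction r with
  | nil => simp [PySem.Chars.rstrip]
  | cons d r ih =>
    rw [pvRstrip_cons]
    by_cases hd : PySem.Chars.isspace d = true
    · simp only [hd, if_pos]
      by_cases h : (PySem.Chars.rstrip r).isEmpty
      · simp [h, List.takeWhile, hd]
      · have h' : (PySem.Chars.rstrip r).isEmpty = false := by simpa using h
        simp [h', List.takeWhile, hd]
    · have hd' : PySem.Chars.isspace d = false := by simpa using hd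
      by_cases h : (PySem.Chars.rstrip r).isEmpty
      · have hall := (pvRstrip_eq_nil_iff r).mp (List.isEmpty_iff.mp h)
        have : r.takeWhile (fun d => !PySem.Chars.isspace d) = [] := by
          cases r with
          | nil => simp
          | cons e r' => simp [List.takeWhile, hall e (by simp)]
        simp [h, hd', List.takeWhile, this]
      · have h' : (PySem.Chars.rstrip r).isEmpty = false := by simpa using h
        simp [h', List.takeWhile, hd', ih]

-- A's loop body depends only on the word list of the segment
lemma pvStepA_char (names : List String) (seg : List Char) :
    pvStepA names seg =
      match PySem.Chars.split₀ seg with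
      | [] => names
      | w :: _ => names ++ [String.mk (PySem.Chars.lower w)] := by
  induction seg with
  | nil => simp [pvStepA, PySem.Chars.strip, PySem.Chars.lstrip, PySem.Chars.rstrip, pvSplit₀_nil]
  | cons c r ih =>
    by_cases hc : PySem.Chars.isspace c = true
    · have hstrip : PySem.Chars.strip (c :: r) = PySem.Chars.strip r := by
        simp [PySem.Chars.strip, PySem.Chars.lstrip, List.dropWhile, hc]
      rw [pvSplit₀_cons_space c r hc]
      rw [← ih]
      simp [pvStepA, hstrip]
    · have hc' : PySem.Chars.isspace c = false := by simpa using hc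
      have hl : PySem.Chars.lstrip (c :: r) = c :: r := by
        simp [PySem.Chars.lstrip, List.dropWhile, hc']
      have hstrip : PySem.Chars.strip (c :: r) = c :: PySem.Chars.rstrip r := by
        rw [PySem.Chars.strip, hl, pvRstrip_cons]
        by_cases h : (PySem.Chars.rstrip r).isEmpty
        · simp [h, hc', List.isEmpty_iff.mp h]
        · have h' : (PySem.Chars.rstrip r).isEmpty = false := by simpa using h
          simp [h']
      rw [pvSplit₀_cons_nonspace c r hc']
      simp only [pvStepA, hstrip, List.isEmpty_cons, if_false]
      rw [pvSplit₀_cons_nonspace c (PySem.Chars.rstrip r) hc', pvTakeWhile_rstrip]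
      simp [PySem.List.pyGet?, PySem.List.pyIdx?]

-- A's loop body on a pure token equals B's flush
lemma pvStepA_flush (names : List String) (tok : List Char)
    (htok : ∀ c ∈ tok, PySem.Chars.isspace c = false ∧ c ≠ ';') :
    pvStepA names tok = pvFlushB names tok := by
  cases tok with
  | nil => simp [pvStepA_char, pvSplit₀_nil, pvFlushB]
  | cons x t =>
    rw [pvStepA_char, pvSplit₀_cons_nonspace x t (htok x (by simp)).1]
    have ht : t.takeWhile (fun d => !PySem.Chars.isspace d) = t :=
      List.takeWhile_eq_self_iff.mpr (fun d hd => by simp [(htok d (by simp [hd])).1])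
    simp [ht, pvFlushB]

-- A's loop body on token ++ (space-led tail) also equals B's flush
lemma pvStepA_flush_app (names : List String) (x : Char) (t rest : List Char) (c : Char)
    (htok : ∀ d ∈ x :: t, PySem.Chars.isspace d = false ∧ d ≠ ';')
    (hc : PySem.Chars.isspace c = true) :
    pvStepA names ((x :: t) ++ c :: rest) = names ++ [String.mk (PySem.Chars.lower (x :: t))] := by
  rw [pvStepA_char]
  simp only [List.cons_append]
  rw [pvSplit₀_cons_nonspace x (t ++ c :: rest) (htok x (by simp)).1]
  have ht : (t ++ c :: rest).takeWhile (fun d => !PySem.Chars.isspace d) = t := by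
    induction t with
    | nil => simp [List.takeWhile, hc]
    | cons e t' ih' =>
      simp only [List.cons_append, List.takeWhile_cons, (htok e (by simp)).1,
        Bool.not_false, if_pos]
      rw [ih' (fun d hd => htok d (by simp at hd ⊢; tauto))]
  simp [ht]

-- main invariant: B's scan state vs A's fold over the remaining segments
lemma pvMain : ∀ (l : List Char) (names : List String) (tok : List Char) (seen : Bool),
    (seen = true → tok = []) →
    (∀ c ∈ tok, PySem.Chars.isspace c = false ∧ c ≠ ';') →
    pvGoB l names tok seen =
      if seen then (pvSemiSplit l).tail.foldl pvStepA names
      else (pvConsH tok (pvSemiSplit l)).foldl pvStepA names := by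
  intro l
  induction l with
  | nil =>
    intro names tok seen hseen htok
    cases seen with
    | true => simp [pvGoB, hseen rfl, pvFlushB, pvSemiSplit]
    | false =>
      simp only [pvGoB, pvSemiSplit, pvConsH, Bool.false_eq_true, if_false]
      simp [List.foldl, (pvStepA_flush names tok htok).symm]
  | cons c rest ih =>
    intro names tok seen hseen htok
    obtain ⟨h, t, hst⟩ : ∃ h t, pvSemiSplit rest = h :: t := by
      cases hr : pvSemiSplit rest with
      | nil => exact absurd hr (pvSemiSplit_ne_nil rest)
      | cons h t => exact ⟨h, t, rfl⟩
    by_cases hc : c = ';'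
    · subst hc
      have hns : PySem.Chars.isspace ';' = false := by decide
      simp only [pvGoB, if_pos, hns]
      rw [ih (pvFlushB names tok) [] false (by simp) (by simp)]
      simp only [Bool.false_eq_true, if_false, pvConsH_nil _ (pvSemiSplit_ne_nil rest)]
      cases seen with
      | true =>
        simp only [if_pos, pvSemiSplit, List.tail_cons, hseen rfl]
        simp [pvFlushB]
      | false =>
        simp only [Bool.false_eq_true, if_false, pvSemiSplit, if_pos]
        cases hsem : pvSemiSplit rest with
        | nil => exact absurd hsem (pvSemiSplit_ne_nil rest)
        | cons h' t' =>
          simp only [pvConsH, List.append_nil, List.foldl_cons]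
          rw [pvStepA_flush names tok htok]
    · by_cases hsp : PySem.Chars.isspace c = true
      · cases seen with
        | true =>
          have htk := hseen rfl; subst htk
          simp only [pvGoB, if_neg hc, hsp, if_pos, List.isEmpty_nil]
          rw [ih names [] true (fun _ => rfl) (by simp)]
          simp [pvSemiSplit, if_neg hc, hst, pvConsH]
        | false =>
          cases htk : tok with
          | nil =>
            simp only [pvGoB, if_neg hc, hsp, if_pos, List.isEmpty_nil]
            rw [ih names [] false (by simp) (by simp)]
            simp only [Bool.false_eq_true, if_false, pvConsH_nil _ (pvSemiSplit_ne_nil rest),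
              pvSemiSplit, if_neg hc, hst, pvConsH, List.nil_append, List.foldl_cons]
            congr 1
            simp only [List.singleton_append]
            rw [pvStepA_char, pvStepA_char, pvSplit₀_cons_space c h hsp]
          | cons x t' =>
            subst htk
            simp only [pvGoB, if_neg hc, hsp, if_pos, List.isEmpty_cons, Bool.false_eq_true,
              if_false]
            rw [ih (pvFlushB names (x :: t')) [] true (fun _ => rfl) (by simp)]
            simp only [if_pos, pvSemiSplit, if_neg hc, hst, pvConsH, List.tail_cons,
              Bool.false_eq_true, if_false, List.foldl_cons]
            simp only [List.singleton_append, ← List.cons_append]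
            rw [pvStepA_flush_app names x t' h c htok hsp]
            simp [pvFlushB]
      · have hsp' : PySem.Chars.isspace c = false := by simpa using hsp
        cases seen with
        | true =>
          have htk := hseen rfl; subst htk
          simp only [pvGoB, if_neg hc, hsp', Bool.false_eq_true, if_false, if_pos]
          rw [ih names [] true (fun _ => rfl) (by simp)]
          simp [pvSemiSplit, if_neg hc, hst, pvConsH]
        | false =>
          simp only [pvGoB, if_neg hc, hsp', Bool.false_eq_true, if_false]
          rw [ih names (tok ++ [c]) false (by simp)
            (by intro d hd; rcases List.mem_append.mp hd with h' | h'
                · exact htok d h'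
                · simp at h'; subst h'; exact ⟨hsp', hc⟩)]
          simp [pvSemiSplit, if_neg hc, hst, pvConsH]

-- ===== VERDICT (by name: the statement is the Claim_ definition above) =====
theorem parse_csp_directive_names_py_spec : Claim_equal_parse_csp_directive_names_py := by
  intro value _
  show parse_csp_directive_names_py value = parse_csp_directive_names_py_alt value
  rw [parse_csp_directive_names_py, parse_csp_directive_names_py_alt, pvSplitOn_semi]
  rw [pvMain value.toList [] [] false (by simp) (by simp)]
  simp [pvConsH_nil _ (pvSemiSplit_ne_nil value.toList)]
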